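-- pv_equiv track=rewrite | github.com/Matthieuhakim/RAG-Pipeline | app/ingestion.py | _find_chunk_end
-- ===== SOURCE A (Python) =====
-- def _find_chunk_end(text: str, start: int, chunk_size: int) -> int:
--     ideal_end = min(len(text), start + chunk_size)
--     if ideal_end >= len(text):
--         return len(text)
--
--     window = text[start:ideal_end]
--     punctuation_candidates = [window.rfind(mark) for mark in (".", "!", "?")]
--     boundary = max(punctuation_candidates)
--     if boundary != -1 and boundary > int(chunk_size * 0.6):
--         return start + boundary + 1
--
--     whitespace_boundary = window.rfind(" ")
--     if whitespace_boundary != -1 and whitespace_boundary > int(chunk_size * 0.6):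
--         return start + whitespace_boundary
--
--     return ideal_end
-- ===== SOURCE B (Python) =====
-- def _find_chunk_end(text: str, start: int, chunk_size: int) -> int:
--     n = len(text)
--     ideal_end = min(n, start + chunk_size)
--     if ideal_end >= n:
--         return n
--     window = text[start:ideal_end]
--     threshold = int(chunk_size * 0.6)
--     lo = max(threshold + 1, 0)
--     space_idx = -1
--     # one right-to-left scan over the qualifying region only:
--     # first punctuation met is the rightmost one and already beats the
--     # threshold, so return immediately; remember the rightmost space.
--     for i in range(len(window) - 1, lo - 1, -1):
--         c = window[i]
--         if c in ".!?":
--             return start + i + 1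
--         if c == " " and space_idx == -1:
--             space_idx = i
--     if space_idx != -1:
--         return start + space_idx
--     return ideal_end
-- ===== Notes on version B (the rewrite author's own statement) =====
-- stated objective: alternative
-- what changed: Replaces A's four full rfind passes over the window (three punctuation marks plus space) and the max/post-checks by a single right-to-left scan restricted to the indices that can beat the 0.6*chunk_size threshold, returning immediately at the first punctuation met and remembering the rightmost space.
import Mathlib
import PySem

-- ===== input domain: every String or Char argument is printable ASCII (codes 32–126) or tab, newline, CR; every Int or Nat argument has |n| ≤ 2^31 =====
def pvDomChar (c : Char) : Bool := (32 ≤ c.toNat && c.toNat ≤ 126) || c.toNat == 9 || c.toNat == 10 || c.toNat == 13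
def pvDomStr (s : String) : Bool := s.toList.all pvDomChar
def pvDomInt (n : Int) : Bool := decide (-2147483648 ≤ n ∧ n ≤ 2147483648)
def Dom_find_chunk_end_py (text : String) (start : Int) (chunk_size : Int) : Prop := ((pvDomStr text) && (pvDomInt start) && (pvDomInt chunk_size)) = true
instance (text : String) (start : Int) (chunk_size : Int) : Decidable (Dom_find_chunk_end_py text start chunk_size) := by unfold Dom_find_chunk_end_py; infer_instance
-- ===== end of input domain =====

-- B replaces A's four full rfind passes (three punctuation marks + space) by one
-- right-to-left scan restricted to the indices that can beat the threshold, with an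
-- early return at the first punctuation met (objective: alternative decomposition).


-- Exact integer model of Python's `int(chunk_size * 0.6)`: 0.6 is the IEEE-754 double
-- 5404319552844595 * 2^-53; the product of a double-exact chunk_size (|cs| ≤ 2^31 < 2^53,
-- no overflow on the stated domain) with it is rounded to nearest/ties-to-even to 53
-- significant bits, then truncated toward zero.  Used by both ports (it is the same
-- subexpression in both Pythons).
def pyMul06Trunc (cs : Int) : Int :=
  let p := cs * 5404319552844595
  let n := p.natAbs
  if n = 0 then 0 else
  let k := Nat.log2 n + 1
  let v : Nat :=
    if k ≤ 53 then n / 2 ^ 53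
    else
      let sh := k - 53
      let q := n / 2 ^ sh
      let r := n % 2 ^ sh
      let half := 2 ^ (sh - 1)
      let q := if half < r ∨ (r = half ∧ q % 2 = 1) then q + 1 else q
      if 53 ≤ sh then q * 2 ^ (sh - 53) else q / 2 ^ (53 - sh)
  if p < 0 then -(v : Int) else (v : Int)

-- ===== PORT A =====
def find_chunk_end_py (text : String) (start : Int) (chunk_size : Int) : Int :=
  let ideal_end := min (PySem.Str.len text) (start + chunk_size)
  if PySem.Str.len text ≤ ideal_end then PySem.Str.len text
  else
    let window := PySem.Str.slice text (some start) (some ideal_end)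
    let punctuation_candidates :=
      [PySem.Str.rfind window ".", PySem.Str.rfind window "!", PySem.Str.rfind window "?"]
    let boundary := (PySem.List.max? punctuation_candidates (fun x => x)).getD (-1)
    if boundary ≠ -1 ∧ pyMul06Trunc chunk_size < boundary then start + boundary + 1
    else
      let whitespace_boundary := PySem.Str.rfind window " "
      if whitespace_boundary ≠ -1 ∧ pyMul06Trunc chunk_size < whitespace_boundary then
        start + whitespace_boundary
      else ideal_end

-- ===== PORT B =====
-- the `for i in range(len(window)-1, lo-1, -1)` loop of Source B; returns
-- (punctuation index or -1 (early return), space_idx); second Nat argument is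
-- one past the current index.
def pvScanB (w : List Char) (lo : Nat) : Int → Nat → Int × Int
  | sp, 0 => (-1, sp)
  | sp, i + 1 =>
    if i + 1 ≤ lo then (-1, sp)
    else
      let c := w.getD i ' '
      if c = '.' ∨ c = '!' ∨ c = '?' then ((i : Int), sp)
      else if c = ' ' ∧ sp = -1 then pvScanB w lo (i : Int) i
      else pvScanB w lo sp i

def find_chunk_end_py_alt (text : String) (start : Int) (chunk_size : Int) : Int :=
  let n := PySem.Str.len text
  let ideal_end := min n (start + chunk_size)
  if n ≤ ideal_end then n
  else
    let window := (PySem.Str.slice text (some start) (some ideal_end)).toList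
    let threshold := pyMul06Trunc chunk_size
    let lo := (max (threshold + 1) 0).toNat
    let res := pvScanB window lo (-1) window.length
    if res.1 ≠ -1 then start + res.1 + 1
    else if res.2 ≠ -1 then start + res.2
    else ideal_end

-- ===== PRECONDITION & SPEC =====
def Spec_find_chunk_end_py (text : String) (start : Int) (chunk_size : Int) (out : Int) : Prop := out = find_chunk_end_py_alt text start chunk_size
instance (text : String) (start : Int) (chunk_size : Int) (out : Int) : Decidable (Spec_find_chunk_end_py text start chunk_size out) := by unfold Spec_find_chunk_end_py; infer_instance

-- ===== CLAIM (what is proved, stated in full; the proofs are below) =====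
def Claim_equal_find_chunk_end_py : Prop := ∀ (text : String) (start : Int) (chunk_size : Int), Dom_find_chunk_end_py text start chunk_size → Spec_find_chunk_end_py text start chunk_size (find_chunk_end_py text start chunk_size)

-- ===== LEMMAS AND PROOFS =====

-- greatest j < i with q j, else -1
def pvLast (q : Nat → Bool) : Nat → Int
  | 0 => -1
  | i + 1 => if q i then (i : Int) else pvLast q i

theorem pvLast_lt (q : Nat → Bool) (i : Nat) : pvLast q i < i := by
  induction i with
  | zero => simp [pvLast]
  | succ i ih => simp only [pvLast]; split <;> omega

theorem pvLast_ge (q : Nat → Bool) (i : Nat) : -1 ≤ pvLast q i := by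
  induction i with
  | zero => simp [pvLast]
  | succ i ih => simp only [pvLast]; split <;> omega

theorem pvLast_of_false (q : Nat → Bool) (i : Nat) (h : ∀ j < i, q j = false) :
    pvLast q i = -1 := by
  induction i with
  | zero => rfl
  | succ i ih =>
    simp only [pvLast, h i (by omega)]
    simp only [Bool.false_eq_true, if_false]
    exact ih (fun j hj => h j (by omega))

theorem pvLast_max (q1 q2 : Nat → Bool) (i : Nat) :
    max (pvLast q1 i) (pvLast q2 i) = pvLast (fun j => q1 j || q2 j) i := by
  induction i with
  | zero => rfl
  | succ i ih =>
    simp only [pvLast]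
    have h1 := pvLast_lt q1 i
    have h2 := pvLast_lt q2 i
    rcases Bool.dichotomy (q1 i) with hq1 | hq1 <;> rcases Bool.dichotomy (q2 i) with hq2 | hq2 <;>
      simp only [hq1, hq2, Bool.true_or, Bool.or_true, Bool.false_or, Bool.or_false] <;>
      simp only [Bool.false_eq_true, if_false, if_true] <;>
      first
        | omega
        | (rw [← ih]; omega)

-- restricting to indices ≥ lo
theorem pvLast_restrict (q : Nat → Bool) (lo i : Nat) :
    pvLast (fun j => decide (lo ≤ j) && q j) i =
      if (lo : Int) ≤ pvLast q i then pvLast q i else -1 := by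
  induction i with
  | zero => simp [pvLast]
  | succ i ih =>
    simp only [pvLast]
    by_cases hlo : lo ≤ i
    · rcases Bool.dichotomy (q i) with hq | hq
      · simp only [hq, Bool.and_false, Bool.false_eq_true, if_false]; exact ih
      · simp [hq, hlo]
    · have hqlo : (decide (lo ≤ i) && q i) = false := by
        simp [decide_eq_false (by omega : ¬ lo ≤ i)]
      simp only [hqlo, Bool.false_eq_true, if_false]
      rw [ih]
      have hlt := pvLast_lt q i
      rcases Bool.dichotomy (q i) with hq | hq
      · simp [hq]
      · simp only [hq, if_true]
        split <;> split <;> omega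

-- [c].isPrefixOf (w.drop j) tests w[j]
theorem isPrefixOf_drop_single (w : List Char) (c : Char) (j : Nat) :
    [c].isPrefixOf (w.drop j) = (w[j]? == some c) := by
  cases hd : w.drop j with
  | nil =>
    have hlen : w.length ≤ j := by
      have h := congrArg List.length hd
      simp only [List.length_drop, List.length_nil] at h
      omega
    rw [List.getElem?_eq_none hlen]
    rfl
  | cons a t =>
    have hj : w[j]? = some a := by
      have h0 : (w.drop j)[0]? = some a := by rw [hd]; rfl
      rw [List.getElem?_drop] at h0
      simpa using h0
    rw [hj]
    show (c == a && List.isPrefixOf [] t) = (some a == some c)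
    have hca : (c == a) = (a == c) := by
      rcases eq_or_ne a c with h | h
      · simp [h]
      · simp [h, Ne.symm h]
    simp [hca]

-- PySem.Chars.rfind with a single-char needle is pvLast of the char test
theorem rfind_go_eq (w : List Char) (c : Char) (i : Nat) :
    PySem.Chars.rfind.go w [c] i = pvLast (fun j => w[j]? == some c) (i + 1) := by
  induction i with
  | zero =>
    have h0 : [c].isPrefixOf w = (w[0]? == some c) := by
      simpa using isPrefixOf_drop_single w c 0
    simp [PySem.Chars.rfind.go, pvLast, h0]
  | succ i ih =>
    simp only [PySem.Chars.rfind.go, pvLast, isPrefixOf_drop_single w c (i + 1)]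
    rw [ih]
    rcases Bool.dichotomy (w[i+1]? == some c) with h | h <;> simp [h, pvLast]

theorem rfind_single (w : List Char) (c : Char) :
    PySem.Chars.rfind w [c] = pvLast (fun j => w[j]? == some c) w.length := by
  rw [PySem.Chars.rfind, rfind_go_eq]
  have : (fun j => w[j]? == some c) w.length = false := by
    simp [List.getElem?_eq_none (Nat.le_refl _)]
  simp [pvLast, this]

-- the scan loop: first component is the restricted last punctuation index
theorem pvScanB_fst (w : List Char) (lo : Nat) (i : Nat) (hi : i ≤ w.length) (sp : Int) :
    (pvScanB w lo sp i).1 =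
      pvLast (fun j => decide (lo ≤ j) &&
        (w[j]? == some '.' || w[j]? == some '!' || w[j]? == some '?')) i := by
  induction i generalizing sp with
  | zero => rfl
  | succ i ih =>
    simp only [pvScanB]
    by_cases hstop : i + 1 ≤ lo
    · rw [if_pos hstop, pvLast_of_false _ _
        (fun j hj => by simp [decide_eq_false (show ¬ lo ≤ j by omega)])]
    · have hget : w[i]? = some (w.getD i ' ') := by
        rw [List.getD_eq_getElem?_getD, List.getElem?_eq_getElem (by omega)]; rfl
      rw [if_neg hstop]
      set ci : Char := w.getD i ' ' with hci
      by_cases hp : ci = '.' ∨ ci = '!' ∨ ci = '?'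
      · have hq : (decide (lo ≤ i) && (w[i]? == some '.' || w[i]? == some '!' || w[i]? == some '?')) = true := by
          rcases hp with h | h | h <;> simp [hget, h, decide_eq_true (show lo ≤ i by omega)]
        rw [if_pos hp]
        simp only [pvLast, hq, if_true]
      · have hq : (decide (lo ≤ i) && (w[i]? == some '.' || w[i]? == some '!' || w[i]? == some '?')) = false := by
          push_neg at hp
          simp [hget, hp.1, hp.2.1, hp.2.2]
        rw [if_neg hp]
        simp only [pvLast, hq, Bool.false_eq_true, if_false]
        split
        · exact ih (by omega) _
        · exact ih (by omega) _

-- the scan loop: when no punctuation fires, second component is the restricted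
-- last space index (starting sentinel sp = -1), or the sentinel sp otherwise
theorem pvScanB_snd (w : List Char) (lo : Nat) (i : Nat) (hi : i ≤ w.length) (sp : Int)
    (hq : pvLast (fun j => decide (lo ≤ j) &&
        (w[j]? == some '.' || w[j]? == some '!' || w[j]? == some '?')) i = -1) :
    (pvScanB w lo sp i).2 =
      if sp = -1 then pvLast (fun j => decide (lo ≤ j) && (w[j]? == some ' ')) i else sp := by
  induction i generalizing sp with
  | zero => simp [pvScanB, pvLast]
  | succ i ih =>
    simp only [pvScanB]
    by_cases hstop : i + 1 ≤ lo
    · rw [if_pos hstop, pvLast_of_false _ _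
        (fun j hj => by simp [decide_eq_false (show ¬ lo ≤ j by omega)])]
      simp
    · have hget : w[i]? = some (w.getD i ' ') := by
        rw [List.getD_eq_getElem?_getD, List.getElem?_eq_getElem (by omega)]; rfl
      rw [if_neg hstop]
      set ci : Char := w.getD i ' ' with hci
      by_cases hp : ci = '.' ∨ ci = '!' ∨ ci = '?'
      · exfalso
        have hqt : (decide (lo ≤ i) && (w[i]? == some '.' || w[i]? == some '!' || w[i]? == some '?')) = true := by
          rcases hp with h | h | h <;> simp [hget, h, decide_eq_true (show lo ≤ i by omega)]
        simp only [pvLast, hqt, if_true] at hq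
        omega
      · have hq0 : (decide (lo ≤ i) && (w[i]? == some '.' || w[i]? == some '!' || w[i]? == some '?')) = false := by
          push_neg at hp
          simp [hget, hp.1, hp.2.1, hp.2.2]
        have hq' : pvLast (fun j => decide (lo ≤ j) &&
            (w[j]? == some '.' || w[j]? == some '!' || w[j]? == some '?')) i = -1 := by
          simpa [pvLast, hq0] using hq
        rw [if_neg hp]
        by_cases hsC : ci = ' ' ∧ sp = -1
        · have hs : (decide (lo ≤ i) && (w[i]? == some ' ')) = true := by
            simp [hget, hsC.1, decide_eq_true (show lo ≤ i by omega)]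
          rw [if_pos hsC, ih (by omega) _ hq', if_neg (by omega : ¬ (i : Int) = -1)]
          simp only [hsC.2, if_true, pvLast, hs]
        · rw [if_neg hsC, ih (by omega) _ hq']
          by_cases hsp : sp = -1
          · have hsne : ¬ ci = ' ' := fun hc => hsC ⟨hc, hsp⟩
            have hs : (w[i]? == some ' ') = false := by simp [hget, hsne]
            simp [hsp, pvLast, hs]
          · simp [hsp]

-- ===== VERDICT (by name: the statement is the Claim_ definition above) =====
theorem find_chunk_end_py_spec : Claim_equal_find_chunk_end_py := by
  intro text start chunk_size _
  unfold Spec_find_chunk_end_py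
  simp only [find_chunk_end_py, find_chunk_end_py_alt]
  by_cases hend : PySem.Str.len text ≤ min (PySem.Str.len text) (start + chunk_size)
  · rw [if_pos hend, if_pos hend]
  · rw [if_neg hend, if_neg hend]
    set w := (PySem.Str.slice text (some start) (some (min (PySem.Str.len text) (start + chunk_size)))).toList with hw
    set thr := pyMul06Trunc chunk_size with hthr
    set lo := (max (thr + 1) 0).toNat with hlo
    have hloInt : (lo : Int) = max (thr + 1) 0 := Int.toNat_of_nonneg (by omega)
    -- A's boundary as pvLast of the punctuation test
    have hr1 : PySem.Str.rfind (PySem.Str.slice text (some start) (some (min (PySem.Str.len text) (start + chunk_size)))) "." = pvLast (fun j => w[j]? == some '.') w.length := by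
      rw [PySem.Str.rfind_eq]; exact rfind_single w '.'
    have hr2 : PySem.Str.rfind (PySem.Str.slice text (some start) (some (min (PySem.Str.len text) (start + chunk_size)))) "!" = pvLast (fun j => w[j]? == some '!') w.length := by
      rw [PySem.Str.rfind_eq]; exact rfind_single w '!'
    have hr3 : PySem.Str.rfind (PySem.Str.slice text (some start) (some (min (PySem.Str.len text) (start + chunk_size)))) "?" = pvLast (fun j => w[j]? == some '?') w.length := by
      rw [PySem.Str.rfind_eq]; exact rfind_single w '?'
    have hr4 : PySem.Str.rfind (PySem.Str.slice text (some start) (some (min (PySem.Str.len text) (start + chunk_size)))) " " = pvLast (fun j => w[j]? == some ' ') w.length := by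
      rw [PySem.Str.rfind_eq]; exact rfind_single w ' '
    set BA := pvLast (fun j => (w[j]? == some '.' || w[j]? == some '!' || w[j]? == some '?')) w.length with hBA
    set SA := pvLast (fun j => w[j]? == some ' ') w.length with hSA
    have hmax : (PySem.List.max? [pvLast (fun j => w[j]? == some '.') w.length,
        pvLast (fun j => w[j]? == some '!') w.length,
        pvLast (fun j => w[j]? == some '?') w.length] (fun x => x)).getD (-1) = BA := by
      rw [PySem.List.max?_id_cons]
      simp only [List.foldl, Option.getD_some]
      rw [pvLast_max, pvLast_max]
    have hBAge := pvLast_ge (fun j => (w[j]? == some '.' || w[j]? == some '!' || w[j]? == some '?')) w.length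
    have hSAge := pvLast_ge (fun j => w[j]? == some ' ') w.length
    have hfst : (pvScanB w lo (-1) w.length).1 = if (lo : Int) ≤ BA then BA else -1 := by
      rw [pvScanB_fst w lo w.length (le_refl _) (-1)]
      have := pvLast_restrict (fun j => (w[j]? == some '.' || w[j]? == some '!' || w[j]? == some '?')) lo w.length
      rw [← hBA] at this
      exact this
    rw [hr1, hr2, hr3, hr4, hmax]
    by_cases hP : BA ≠ -1 ∧ thr < BA
    · have hge : (lo : Int) ≤ BA := by rw [hloInt]; omega
      rw [if_pos hP, hfst, if_pos hge, if_pos (by omega : BA ≠ -1)]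
    · have hlt : ¬ (lo : Int) ≤ BA := by rw [hloInt]; omega
      have hfst' : (pvScanB w lo (-1) w.length).1 = -1 := by rw [hfst, if_neg hlt]
      have hsnd : (pvScanB w lo (-1) w.length).2 = if (lo : Int) ≤ SA then SA else -1 := by
        have hq0 : pvLast (fun j => decide (lo ≤ j) &&
            (w[j]? == some '.' || w[j]? == some '!' || w[j]? == some '?')) w.length = -1 := by
          rw [← pvScanB_fst w lo w.length (le_refl _) (-1)]; exact hfst'
        rw [pvScanB_snd w lo w.length (le_refl _) (-1) hq0, if_pos rfl]
        have := pvLast_restrict (fun j => w[j]? == some ' ') lo w.length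
        rw [← hSA] at this
        exact this
      rw [if_neg hP, hfst', if_neg (by omega : ¬ (-1 : Int) ≠ -1)]
      by_cases hS : SA ≠ -1 ∧ thr < SA
      · have hge : (lo : Int) ≤ SA := by rw [hloInt]; omega
        rw [if_pos hS, hsnd, if_pos hge, if_pos (by omega : SA ≠ -1)]
      · have hlt' : ¬ (lo : Int) ≤ SA := by rw [hloInt]; omega
        rw [if_neg hS, hsnd, if_neg hlt', if_neg (by omega : ¬ (-1 : Int) ≠ -1)]
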